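-- pv_equiv track=rewrite | github.com/nhf216/scaj-fpt | MPS_FPT.py | matchings
-- ===== SOURCE A (Python) =====
-- def unmatched(matching, n, left = True):
--     unmatched_vertices = set(range(n))
--     if left:
--         index = 0
--     else:
--         index = 1
--     for pair in matching:
--         unmatched_vertices.remove(pair[index])
--     return frozenset(unmatched_vertices)
--
-- def matchings(m, n):
--     if m == 0 or n == 0:
--         return frozenset([frozenset()])
--     #Start with matchings without n-1
--     prev_matchings = matchings(m, n - 1)
--     #Insert n-1 wherever possible
--     matches = set()
--     for matching in prev_matchings:
--         #This includes not matching n-1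
--         matches.add(matching)
--         #Or matching it with any of the unmatched left vertices
--         unmatched_left = unmatched(matching, m)
--         for vtx in unmatched_left:
--             matching2 = set(matching)
--             matching2.add((vtx, n - 1))
--             matches.add(frozenset(matching2))
--     return matches
-- ===== SOURCE B (Python) =====
-- def matchings(m, n):
--     if m == 0 or n == 0:
--         return frozenset([frozenset()])
--     result = {frozenset()}
--     for j in range(n):
--         nxt = set()
--         for matching in result:
--             nxt.add(matching)
--             used = {p[0] for p in matching}
--             for v in range(m):
--                 if v not in used:
--                     m2 = set(matching)
--                     m2.add((v, j))
--                     nxt.add(frozenset(m2))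
--         result = nxt
--     return result
-- ===== Notes on version B (the rewrite author's own statement) =====
-- stated objective: alternative
-- what changed: Replaces the recursion on n by an iterative loop over the right vertices 0..n-1 that extends the set of matchings level by level, and drops the unmatched helper with its set-removals: free left vertices are found by filtering range(m) against the lefts already used in the matching.
import Mathlib
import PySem

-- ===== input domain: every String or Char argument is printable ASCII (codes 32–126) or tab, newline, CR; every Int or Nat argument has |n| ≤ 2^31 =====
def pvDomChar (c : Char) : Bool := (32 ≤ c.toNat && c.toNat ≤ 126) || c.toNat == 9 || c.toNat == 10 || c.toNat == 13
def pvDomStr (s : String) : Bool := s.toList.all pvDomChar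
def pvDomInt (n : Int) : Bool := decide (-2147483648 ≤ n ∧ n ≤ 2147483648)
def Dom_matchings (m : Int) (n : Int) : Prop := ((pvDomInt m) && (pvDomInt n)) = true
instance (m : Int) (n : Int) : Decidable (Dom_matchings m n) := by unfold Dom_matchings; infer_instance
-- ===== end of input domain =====

-- B replaces A's recursion on n by an iterative loop over the right vertices that extends
-- the set of matchings level by level; no unmatched helper (free lefts filter range(m)).


-- ===== PORT A =====
-- unmatched(matching, n, left=True); the KeyError branch of set.remove (element absent) is
-- unreachable from matchings' calls, ported as 'keep the set unchanged' via Option.getD.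
def unmatchedA (matching : List (Int × Int)) (n : Int) (left : Bool) : List Int :=
  matching.foldl
    (fun s pair => (PySem.Set.remove? s (if left then pair.1 else pair.2)).getD s)
    (PySem.Set.ofList (PySem.List.pyRange 0 n 1))

def matchings (m : Int) (n : Int) : List (List (Int × Int)) :=
  if m = 0 ∨ n = 0 then [[]]
  else if n < 0 then []  -- Python's recursion never terminates here (RecursionError); outside Pre_
  else
    let prev := matchings m (n - 1)
    prev.foldl
      (fun ms matching =>
        let ms' := PySem.Set.add ms matching
        let ul := unmatchedA matching m true
        ul.foldl
          (fun ms vtx => PySem.Set.add ms (PySem.Set.add (PySem.Set.ofList matching) (vtx, n - 1)))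
          ms')
      PySem.Set.empty
termination_by n.toNat
decreasing_by omega

-- ===== PORT B =====
def matchings_alt (m : Int) (n : Int) : List (List (Int × Int)) :=
  if m = 0 ∨ n = 0 then [[]]
  else
    (PySem.List.pyRange 0 n 1).foldl
      (fun result j =>
        result.foldl
          (fun nxt matching =>
            let nxt' := PySem.Set.add nxt matching
            let used := PySem.Set.ofList (matching.map Prod.fst)
            (PySem.List.pyRange 0 m 1).foldl
              (fun nxt v =>
                if ¬ PySem.Set.contains used v then
                  PySem.Set.add nxt (PySem.Set.add (PySem.Set.ofList matching) (v, j))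
                else nxt)
              nxt')
          PySem.Set.empty)
      [[]]

-- ===== PRECONDITION & SPEC =====
-- Pre_ excludes exactly m ≠ 0 ∧ n < 0, where A's recursion raises RecursionError.
def Pre_matchings (m : Int) (n : Int) : Prop := m = 0 ∨ 0 ≤ n
instance (m : Int) (n : Int) : Decidable (Pre_matchings m n) := by unfold Pre_matchings; infer_instance
def pvWitness_matchings : Int × Int := (2, 2)

def Spec_matchings (m : Int) (n : Int) (out : List (List (Int × Int))) : Prop := out = matchings_alt m n
instance (m : Int) (n : Int) (out : List (List (Int × Int))) : Decidable (Spec_matchings m n out) := by unfold Spec_matchings; infer_instance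

-- ===== CLAIM (what is proved, stated in full; the proofs are below) =====
def Claim_equal_matchings : Prop := ∀ (m : Int) (n : Int), Dom_matchings m n → Pre_matchings m n → Spec_matchings m n (matchings m n)

-- ===== LEMMAS AND PROOFS =====

lemma remove_getD (s : PySem.Set Int) (x : Int) :
    (PySem.Set.remove? s x).getD s = PySem.Set.discard s x := by
  unfold PySem.Set.remove?
  split
  · rfl
  · next h =>
    unfold PySem.Set.discard
    rw [Option.getD_none]
    symm
    apply List.filter_eq_self.mpr
    intro y hy
    simp only [Bool.not_eq_eq_eq_not, Bool.not_true, beq_eq_false_iff_ne, ne_eq]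
    rintro rfl
    exact h (by simp [PySem.Set.contains, hy])

lemma foldl_discard (l : List (Int × Int)) :
    ∀ (s : List Int), l.foldl (fun s p => PySem.Set.discard s p.1) s
      = s.filter (fun v => !((l.map Prod.fst).contains v)) := by
  induction l with
  | nil => intro s; simp
  | cons p t ih =>
    intro s
    rw [List.foldl_cons, ih]
    unfold PySem.Set.discard
    rw [List.filter_filter]
    apply List.filter_congr
    intro v _
    simp [Bool.and_comm]

def freeL (m : Int) (M : List (Int × Int)) : List Int :=
  (PySem.List.pyRange 0 m 1).filter (fun v => ¬ PySem.Set.contains (PySem.Set.ofList (M.map Prod.fst)) v)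

lemma unmatchedA_eq_freeL (M : List (Int × Int)) (m : Int) :
    unmatchedA M m true = freeL m M := by
  unfold unmatchedA freeL
  simp only [if_pos rfl, remove_getD, if_true]
  rw [PySem.Set.ofList_eq_self_of_nodup _ (PySem.List.nodup_pyRange_one 0 m), foldl_discard]
  apply List.filter_congr
  intro v _
  simp [PySem.Set.contains, PySem.Set.mem_ofList]

def blockM (m j : Int) (M : List (Int × Int)) : List (List (Int × Int)) :=
  M :: (freeL m M).map (fun v => M ++ [(v, j)])

def roundB (m j : Int) (l : List (List (Int × Int))) : List (List (Int × Int)) :=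
  l.flatMap (blockM m j)

def InvL (j : Int) (l : List (List (Int × Int))) : Prop :=
  l.Nodup ∧ ∀ M ∈ l, M.Nodup ∧ ∀ p ∈ M, p.2 < j

lemma foldl_set_add_of_nodup {α : Type} [BEq α] [LawfulBEq α] (xs : List α) :
    ∀ (acc : List α), (acc ++ xs).Nodup → xs.foldl PySem.Set.add acc = acc ++ xs := by
  induction xs with
  | nil => intro acc _; simp
  | cons x t ih =>
    intro acc h
    have hx : x ∉ acc := by
      intro hmem
      exact (List.disjoint_of_nodup_append h) hmem (List.mem_cons_self)
    rw [List.foldl_cons, PySem.Set.add_of_not_mem hx, ih (acc ++ [x]) (by simpa using h)]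
    simp

lemma mem_blockM {m j : Int} {M e : List (Int × Int)} (he : e ∈ blockM m j M) :
    e = M ∨ ∃ v ∈ freeL m M, e = M ++ [(v, j)] := by
  rcases List.mem_cons.mp he with rfl | hv
  · exact Or.inl rfl
  · rcases List.mem_map.mp hv with ⟨v, hvf, rfl⟩
    exact Or.inr ⟨v, hvf, rfl⟩

lemma blockM_char {m j : Int} {M : List (Int × Int)} (hM : ∀ p ∈ M, p.2 < j)
    {e : List (Int × Int)} (he : e ∈ blockM m j M) :
    e.filter (fun p => p.2 ≠ j) = M := by
  have hMf : M.filter (fun p => (p.2 ≠ j : Prop)) = M := by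
    apply List.filter_eq_self.mpr
    intro p hp
    simp only [decide_eq_true_eq]
    exact fun h => absurd (hM p hp) (by omega)
  rcases mem_blockM he with rfl | ⟨v, _, rfl⟩
  · exact hMf
  · rw [List.filter_append, hMf]
    simp

lemma nodup_blockM {m j : Int} {M : List (Int × Int)} : (blockM m j M).Nodup := by
  unfold blockM
  refine List.Nodup.cons ?_ ?_
  · intro hmem
    rcases List.mem_map.mp hmem with ⟨v, _, hv⟩
    have := congrArg List.length hv
    simp at this
  · apply List.Nodup.map ?_ ?_
    · intro a b hab
      simpa using List.append_cancel_left hab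
    · exact List.Nodup.filter _ (PySem.List.nodup_pyRange_one 0 m)

lemma nodup_roundB {m j : Int} {l : List (List (Int × Int))} (h : InvL j l) :
    (roundB m j l).Nodup := by
  obtain ⟨hnd, hmem⟩ := h
  unfold roundB
  rw [List.nodup_flatMap]
  refine ⟨fun _ _ => nodup_blockM, ?_⟩
  refine hnd.imp_of_mem ?_
  intro M M' hMl hM'l hne
  intro e heM heM'
  exact hne (by rw [← blockM_char (hmem M hMl).2 heM, ← blockM_char (hmem M' hM'l).2 heM'])

lemma foldl_step_spec (m j : Int) (l : List (List (Int × Int))) (h : InvL j l) :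
    l.foldl
      (fun ms matching =>
        (freeL m matching).foldl
          (fun acc vtx => PySem.Set.add acc (PySem.Set.add (PySem.Set.ofList matching) (vtx, j)))
          (PySem.Set.add ms matching))
      PySem.Set.empty = roundB m j l := by
  obtain ⟨hnd, hmem⟩ := h
  have hblock : ∀ M ∈ l, ∀ (acc : List (List (Int × Int))),
      (freeL m M).foldl
        (fun acc vtx => PySem.Set.add acc (PySem.Set.add (PySem.Set.ofList M) (vtx, j)))
        (PySem.Set.add acc M)
      = (blockM m j M).foldl PySem.Set.add acc := by
    intro M hMl acc
    obtain ⟨hMnd, hMj⟩ := hmem M hMl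
    have hofL : PySem.Set.ofList M = M := PySem.Set.ofList_eq_self_of_nodup M hMnd
    have hstep : ∀ (acc : List (List (Int × Int))) (v : Int),
        PySem.Set.add acc (PySem.Set.add (PySem.Set.ofList M) (v, j))
          = PySem.Set.add acc (M ++ [(v, j)]) := by
      intro acc v
      rw [hofL, PySem.Set.add_of_not_mem (fun hmem' => absurd (hMj _ hmem') (by simp))]
    calc (freeL m M).foldl
          (fun acc vtx => PySem.Set.add acc (PySem.Set.add (PySem.Set.ofList M) (vtx, j)))
          (PySem.Set.add acc M)
        = (freeL m M).foldl (fun acc vtx => PySem.Set.add acc (M ++ [(vtx, j)]))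
            (PySem.Set.add acc M) := by
          exact PySem.List.foldl_congr_mem _ _ _ _ (fun acc v _ => hstep acc v)
      _ = ((freeL m M).map (fun v => M ++ [(v, j)])).foldl PySem.Set.add (PySem.Set.add acc M) := by
          rw [List.foldl_map]
      _ = (blockM m j M).foldl PySem.Set.add acc := by rw [blockM, List.foldl_cons]
  have hnested : ∀ (l' : List (List (Int × Int))), (∀ M ∈ l', M ∈ l) →
      ∀ (acc : List (List (Int × Int))), (acc ++ l'.flatMap (blockM m j)).Nodup →
      l'.foldl
        (fun ms matching =>
          (freeL m matching).foldl
            (fun acc vtx => PySem.Set.add acc (PySem.Set.add (PySem.Set.ofList matching) (vtx, j)))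
            (PySem.Set.add ms matching))
        acc = acc ++ l'.flatMap (blockM m j) := by
    intro l'
    induction l' with
    | nil => intro _ acc _; simp
    | cons M t ih =>
      intro hsub acc hndacc
      rw [List.flatMap_cons, ← List.append_assoc] at hndacc
      have h1 : (acc ++ blockM m j M).Nodup :=
        hndacc.sublist (List.sublist_append_left _ _)
      rw [List.foldl_cons]
      show t.foldl _ ((freeL m M).foldl _ (PySem.Set.add acc M)) = _
      rw [hblock M (hsub M List.mem_cons_self) acc,
        foldl_set_add_of_nodup (blockM m j M) acc h1,
        ih (fun M' hM' => hsub M' (List.mem_cons_of_mem _ hM')) _ hndacc,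
        List.flatMap_cons, List.append_assoc]
  rw [hnested l (fun _ h => h) PySem.Set.empty (by simpa using nodup_roundB ⟨hnd, hmem⟩)]
  simp [roundB, PySem.Set.empty]

lemma invL_round (m j : Int) (l : List (List (Int × Int))) (h : InvL j l) :
    InvL (j + 1) (roundB m j l) := by
  obtain ⟨hnd, hmem⟩ := h
  refine ⟨nodup_roundB ⟨hnd, hmem⟩, ?_⟩
  intro e he
  rcases List.mem_flatMap.mp he with ⟨M, hMl, heM⟩
  obtain ⟨hMnd, hMj⟩ := hmem M hMl
  rcases mem_blockM heM with rfl | ⟨v, _, rfl⟩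
  · exact ⟨hMnd, fun p hp => by have := hMj p hp; omega⟩
  · refine ⟨?_, ?_⟩
    · refine List.Nodup.append hMnd (List.nodup_singleton _) ?_
      intro p hp hp'
      have := hMj p hp
      simp only [List.mem_singleton] at hp'
      subst hp'
      simp at this
    · intro p hp
      rcases List.mem_append.mp hp with hp | hp
      · have := hMj p hp; omega
      · simp only [List.mem_singleton] at hp
        subst hp
        simp

def BStates (m : Int) (n : Int) : List (List (Int × Int)) :=
  (PySem.List.pyRange 0 n 1).foldl (fun result j => roundB m j result) [[]]


-- B's per-level loop body, named for the induction
def BBody (m : Int) : List (List (Int × Int)) → Int → List (List (Int × Int)) :=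
  fun result j =>
    result.foldl
      (fun nxt matching =>
        let nxt' := PySem.Set.add nxt matching
        let used := PySem.Set.ofList (matching.map Prod.fst)
        (PySem.List.pyRange 0 m 1).foldl
          (fun nxt v =>
            if ¬ PySem.Set.contains used v then
              PySem.Set.add nxt (PySem.Set.add (PySem.Set.ofList matching) (v, j))
            else nxt)
          nxt')
      PySem.Set.empty

lemma BBody_spec (m j : Int) (l : List (List (Int × Int))) (h : InvL j l) :
    BBody m l j = roundB m j l := by
  rw [← foldl_step_spec m j l h]
  unfold BBody
  apply PySem.List.foldl_congr_mem
  intro nxt M _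
  show (PySem.List.pyRange 0 m 1).foldl _ (PySem.Set.add nxt M) = _
  rw [PySem.List.foldl_ite_eq_foldl_filter
    (p := fun v => ¬ PySem.Set.contains (PySem.Set.ofList (M.map Prod.fst)) v)]
  rfl

lemma ABody_spec (m j : Int) (l : List (List (Int × Int))) (h : InvL j l) :
    l.foldl
      (fun ms matching =>
        let ms' := PySem.Set.add ms matching
        let ul := unmatchedA matching m true
        ul.foldl
          (fun acc vtx => PySem.Set.add acc (PySem.Set.add (PySem.Set.ofList matching) (vtx, j)))
          ms')
      PySem.Set.empty = roundB m j l := by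
  rw [← foldl_step_spec m j l h]
  apply PySem.List.foldl_congr_mem
  intro ms M _
  show (unmatchedA M m true).foldl _ (PySem.Set.add ms M) = _
  rw [unmatchedA_eq_freeL]

lemma levels (m : Int) (hm : m ≠ 0) : ∀ k : Nat,
    matchings m (k : Int) = BStates m (k : Int) ∧
    (PySem.List.pyRange 0 (k : Int) 1).foldl (BBody m) [[]] = BStates m (k : Int) ∧
    InvL (k : Int) (BStates m (k : Int)) := by
  intro k
  induction k with
  | zero =>
    refine ⟨?_, ?_, ?_, ?_⟩
    · rw [matchings]
      simp [BStates, PySem.List.pyRange_one_eq_nil (le_refl (0 : Int))]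
    · simp [BStates, PySem.List.pyRange_one_eq_nil (le_refl (0 : Int))]
    · simp [BStates, PySem.List.pyRange_one_eq_nil (le_refl (0 : Int))]
    · intro M hM
      simp [BStates, PySem.List.pyRange_one_eq_nil (le_refl (0 : Int))] at hM
      subst hM
      simp
  | succ k ih =>
    obtain ⟨hEq, hB, hInv⟩ := ih
    have hc1 : ¬ (m = 0 ∨ ((k + 1 : Nat) : Int) = 0) := by
      push_cast
      omega
    have hc2 : ¬ (((k + 1 : Nat) : Int) < 0) := by push_cast; omega
    have hcast : ((k + 1 : Nat) : Int) - 1 = (k : Int) := by push_cast; ring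
    have hsucc : ((k + 1 : Nat) : Int) = (k : Int) + 1 := by push_cast; ring
    have hS : BStates m ((k + 1 : Nat) : Int) = roundB m (k : Int) (BStates m (k : Int)) := by
      unfold BStates
      rw [hsucc, PySem.List.pyRange_one_succ_right (by positivity), List.foldl_append]
      simp
    refine ⟨?_, ?_, ?_⟩
    · rw [matchings, if_neg hc1, if_neg hc2]
      simp only [hcast, hEq]
      rw [ABody_spec m (k : Int) (BStates m (k : Int)) hInv, hS]
    · rw [hsucc, PySem.List.pyRange_one_succ_right (by positivity), List.foldl_append]
      simp only [List.foldl_cons, List.foldl_nil, hB]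
      rw [BBody_spec m (k : Int) (BStates m (k : Int)) hInv, ← hsucc, hS]
    · rw [hS, hsucc]
      exact invL_round m (k : Int) _ hInv

-- ===== VERDICT (by name: the statement is the Claim_ definition above) =====
theorem matchings_spec : Claim_equal_matchings := by
  intro m n _ hpre
  unfold Spec_matchings
  by_cases hb : m = 0 ∨ n = 0
  · rw [matchings, if_pos hb]
    unfold matchings_alt
    rw [if_pos hb]
  · have hm : m ≠ 0 := fun h => hb (Or.inl h)
    have hn : 0 ≤ n := by
      rcases hpre with h | h
      · exact absurd h hm
      · exact h
    have hk : ((n.toNat : Nat) : Int) = n := Int.toNat_of_nonneg hn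
    obtain ⟨hEq, hB, _⟩ := levels m hm n.toNat
    rw [hk] at hEq hB
    unfold matchings_alt
    rw [if_neg hb]
    show matchings m n = (PySem.List.pyRange 0 n 1).foldl (BBody m) [[]]
    rw [hEq, hB]
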